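-- pv_equiv track=rewrite | github.com/jeremyle1/VC | source/Rules.py | _straight_combinations
-- ===== SOURCE A (Python) =====
-- def _straight_combinations(cards):
--     """Returns a list of lists where each list contains Cards that make a straight. The length of each straight
--         is the number of unique ranks in cards.
--
--     cards: a list of list of Cards with length at least 3, where each succeeding Card is one rank higher than the
--             previous.
--             e.g. [[3,3], [4,4], [5], [6, 6]]"""
--
--     temp = []
--     # Base case.
--     if not cards:
--         return [[]]
--     else:
--         # Append each card in card[0] to the combinations of cards[1:].
--         for card in cards[0]:
--             for combination in _straight_combinations(cards[1:]):
--                 temp.append([card] + combination)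
--         return temp
-- ===== SOURCE B (Python) =====
-- def _straight_combinations(cards):
--     # Iterative: build suffix combinations once per level, right-to-left.
--     acc = [[]]
--     for level in reversed(cards):
--         acc = [[c] + combo for c in level for combo in acc]
--     return acc
-- ===== Notes on version B (the rewrite author's own statement) =====
-- stated objective: simpler
-- what changed: B replaces A's recursion, which recomputes the suffix combination list once per card at every level, with a single right-to-left loop building each suffix's combination list exactly once; the exponential output size dominates, so no speed-up is claimed.
import Mathlib
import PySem

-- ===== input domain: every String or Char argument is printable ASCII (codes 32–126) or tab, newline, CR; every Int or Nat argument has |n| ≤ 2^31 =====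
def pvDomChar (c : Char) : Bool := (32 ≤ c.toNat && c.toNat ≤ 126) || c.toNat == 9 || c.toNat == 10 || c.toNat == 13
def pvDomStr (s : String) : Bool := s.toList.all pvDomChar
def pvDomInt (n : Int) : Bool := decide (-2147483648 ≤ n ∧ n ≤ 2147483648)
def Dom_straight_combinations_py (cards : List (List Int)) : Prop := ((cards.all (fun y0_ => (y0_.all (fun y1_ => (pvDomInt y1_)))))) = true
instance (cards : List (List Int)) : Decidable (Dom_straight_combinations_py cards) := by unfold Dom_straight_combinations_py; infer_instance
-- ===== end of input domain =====

-- B: one right-to-left loop building each suffix combination list once, instead of A's recursion; return values proved equal.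

-- ===== PORT A =====
-- Literal port of A: recursion, with the recursive call on the tail made inside
-- the loop body, as in the Python nested loops appending [card] + combination.
def straight_combinations_py : List (List Int) → List (List Int)
  | [] => [[]]
  | h :: t =>
      h.foldl (fun temp card =>
        temp ++ (straight_combinations_py t).map (fun combination => card :: combination)) []

-- ===== PORT B =====
-- Literal port of B: acc = [[]]; for level in reversed(cards): acc = [[c]+combo for c in level for combo in acc]
def straight_combinations_py_alt (cards : List (List Int)) : List (List Int) :=
  cards.reverse.foldl
    (fun acc level => level.flatMap (fun c => acc.map (fun combo => c :: combo))) [[]]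

-- ===== PRECONDITION & SPEC =====
def Spec_straight_combinations_py (cards : List (List Int)) (out : List (List Int)) : Prop := out = straight_combinations_py_alt cards
instance (cards : List (List Int)) (out : List (List Int)) : Decidable (Spec_straight_combinations_py cards out) := by unfold Spec_straight_combinations_py; infer_instance

-- ===== CLAIM (what is proved, stated in full; the proofs are below) =====
def Claim_equal_straight_combinations_py : Prop := ∀ (cards : List (List Int)), Dom_straight_combinations_py cards → Spec_straight_combinations_py cards (straight_combinations_py cards)

-- ===== LEMMAS AND PROOFS =====

-- A's accumulating loop is a flatMap.
theorem pv_foldl_append (h : List Int) (L : Int → List (List Int)) (init : List (List Int)) :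
    h.foldl (fun temp card => temp ++ L card) init = init ++ h.flatMap L := by
  induction h generalizing init with
  | nil => simp
  | cons x xs ih => simp [List.foldl_cons, ih, List.append_assoc]

theorem pv_A_cons (t : List (List Int)) (hd : List Int) :
    straight_combinations_py (hd :: t)
      = hd.flatMap (fun c => (straight_combinations_py t).map (fun combo => c :: combo)) := by
  rw [straight_combinations_py, pv_foldl_append]; simp [List.flatMap]

theorem pv_eq (cards : List (List Int)) :
    straight_combinations_py cards = straight_combinations_py_alt cards := by
  unfold straight_combinations_py_alt
  rw [List.foldl_reverse]
  induction cards with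
  | nil => simp [straight_combinations_py]
  | cons hd t ih =>
      rw [pv_A_cons t hd, List.foldr_cons, ← ih]

-- ===== VERDICT (by name: the statement is the Claim_ definition above) =====
theorem straight_combinations_py_spec : Claim_equal_straight_combinations_py := by
  intro cards _
  exact pv_eq cards
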